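-- pv_equiv track=rewrite | github.com/JaviMaligno/ShowCode | HSBC/Filter Letters/solution.py | filter_letters
-- ===== SOURCE A (Python) =====
-- from string import ascii_lowercase
--
-- def filter_letters(message):
--     # Your code goes here
--     values = dict(zip(ascii_lowercase, range(1,len(ascii_lowercase)+1)))
--     message = message.lower()
--     letters = set(message)
--     integer = 0
--     if len(letters) <= 1:
--         return integer
--     for l in letters:
--         times = message.count(l)
--         integer+=values[l]*times if times % 2 else 0
--     return integer
-- ===== SOURCE B (Python) =====
-- def filter_letters(message):
--     # Sort the lowered characters, then scan runs of equal letters with two indices.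
--     chars = sorted(message.lower())
--     total = 0
--     groups = 0
--     n = len(chars)
--     i = 0
--     while i < n:
--         j = i + 1
--         while j < n and chars[j] == chars[i]:
--             j += 1
--         run = j - i
--         groups += 1
--         if run % 2:
--             total += (ord(chars[i]) - 96) * run
--         i = j
--     return total if groups > 1 else 0
-- ===== Notes on version B (the rewrite author's own statement) =====
-- stated objective: alternative
-- what changed: Replaces A's set + one message.count scan per distinct character + zip-built letter-value dict with a sort-then-run-scan: sort the lowered characters and walk runs of equal letters with two indices, adding ord-arithmetic alphabet values for odd-length runs and counting groups for the <=1-distinct guard.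
import Mathlib
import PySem

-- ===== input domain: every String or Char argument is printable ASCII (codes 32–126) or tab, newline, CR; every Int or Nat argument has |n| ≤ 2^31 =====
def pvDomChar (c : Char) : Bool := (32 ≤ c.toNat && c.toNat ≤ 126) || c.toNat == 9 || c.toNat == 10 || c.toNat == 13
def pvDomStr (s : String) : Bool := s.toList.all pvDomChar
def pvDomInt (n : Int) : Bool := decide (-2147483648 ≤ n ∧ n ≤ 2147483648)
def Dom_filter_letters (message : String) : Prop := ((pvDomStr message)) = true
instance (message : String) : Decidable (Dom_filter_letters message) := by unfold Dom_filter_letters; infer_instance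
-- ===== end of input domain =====

-- B replaces A's set + per-letter message.count scans + zip-built value dict with a
-- sort-then-run-scan: sort the lowered characters and walk runs of equal letters,
-- adding ord-arithmetic values for odd-length runs (alternative decomposition, not faster).


-- ===== PORT A =====
-- from string import ascii_lowercase
def pvAsciiLowercase : List Char :=
  ['a','b','c','d','e','f','g','h','i','j','k','l','m','n','o','p','q','r','s','t','u','v','w','x','y','z']

-- values = dict(zip(ascii_lowercase, range(1, len(ascii_lowercase)+1)))
def pvValues : PySem.Dict Char Int :=
  PySem.Dict.ofList (pvAsciiLowercase.zip (PySem.List.pyRange 1 (pvAsciiLowercase.length + 1) 1))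

-- Python's values[l] raises KeyError when l is absent; the port uses getD l 0 there —
-- exactly those inputs are excluded by Pre_filter_letters.
def filter_letters (message : String) : Int :=
  let m : List Char := (PySem.Str.lower message).toList
  let letters : PySem.Set Char := PySem.Set.ofList m
  let integer : Int := 0
  if letters.length ≤ 1 then integer
  else
    letters.foldl (fun integer l =>
      let times : Int := (m.count l : Int)
      integer + (if PySem.Int.mod times 2 ≠ 0 then pvValues.getD l 0 * times else 0)) integer

-- ===== PORT B =====
-- the outer while loop of Source B: one step per run of equal characters of the sorted list;
-- the inner 'while chars[j] == chars[i]' is the takeWhile/dropWhile split, run = j - i.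
def pvScan : List Char → Int → Int → Int × Int
  | [], total, groups => (total, groups)
  | c :: rest, total, groups =>
    let run : Int := 1 + ((rest.takeWhile (fun x => x == c)).length : Int)
    pvScan (rest.dropWhile (fun x => x == c))
      (total + if PySem.Int.mod run 2 ≠ 0 then ((c.toNat : Int) - 96) * run else 0)
      (groups + 1)
termination_by chars _ _ => chars.length
decreasing_by
  have := List.length_dropWhile_le (fun x => x == c) rest
  simp only [List.length_cons]; omega

def filter_letters_alt (message : String) : Int :=
  let chars : List Char := PySem.List.sorted ((PySem.Str.lower message).toList) (fun x => x) false
  let p := pvScan chars 0 0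
  if p.2 > 1 then p.1 else 0

-- ===== PRECONDITION & SPEC =====
-- Pre_ excludes exactly the inputs on which A raises KeyError: a lowered message with more
-- than one distinct character in which some character occurring an odd number of times is
-- not a lowercase letter (A looks such a character up in its a–z value dict).
def Pre_filter_letters (message : String) : Prop :=
  ((PySem.Set.ofList (PySem.Str.lower message).toList).length ≤ 1) ∨
    ((PySem.Str.lower message).toList.all (fun c =>
      !decide ((PySem.Str.lower message).toList.count c % 2 = 1) ||
        pvAsciiLowercase.contains c) = true)
instance (message : String) : Decidable (Pre_filter_letters message) := by
  unfold Pre_filter_letters; infer_instance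
def pvWitness_filter_letters : String := "abca"

def Spec_filter_letters (message : String) (out : Int) : Prop := out = filter_letters_alt message
instance (message : String) (out : Int) : Decidable (Spec_filter_letters message out) := by
  unfold Spec_filter_letters; infer_instance

-- ===== CLAIM (what is proved, stated in full; the proofs are below) =====
def Claim_equal_filter_letters : Prop := ∀ (message : String), Dom_filter_letters message → Pre_filter_letters message → Spec_filter_letters message (filter_letters message)

-- ===== LEMMAS AND PROOFS =====

-- the per-letter contribution of B, over a list ms whose counts are consulted
def pvF (ms : List Char) (c : Char) : Int :=
  if PySem.Int.mod ((ms.count c : Nat) : Int) 2 ≠ 0 then ((c.toNat : Int) - 96) * (ms.count c : Nat) else 0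

-- A's zip-built dict agrees with B's ord arithmetic on every lowercase letter.
lemma pvValues_getD_eq (c : Char) (hc : c ∈ pvAsciiLowercase) :
    pvValues.getD c 0 = (c.toNat : Int) - 96 := by
  fin_cases hc <;> decide

-- head of a dropWhile run fails the predicate
lemma pv_dropWhile_head_ne (p : Char → Bool) (l : List Char) (h : Char) (tl : List Char)
    (hd : l.dropWhile p = h :: tl) : p h = false := by
  induction l generalizing tl with
  | nil => simp at hd
  | cons a l' ih =>
    rw [List.dropWhile_cons] at hd
    by_cases hpa : p a = true
    · rw [if_pos hpa] at hd; exact ih _ hd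
    · rw [if_neg hpa] at hd
      obtain ⟨rfl, -⟩ := List.cons.inj hd
      simpa using hpa

-- run scan over a sorted list = (total + Σ over distinct letters, groups + number of distinct letters)
lemma pvScan_spec (s : List Char) (hs : s.Pairwise (· ≤ ·)) (total groups : Int) :
    pvScan s total groups =
      (total + ∑ c ∈ s.toFinset, pvF s c, groups + (s.toFinset.card : Int)) := by
  induction hn : s.length using Nat.strong_induction_on generalizing s total groups with
  | _ n ih =>
    cases s with
    | nil => simp [pvScan]
    | cons c rest =>
      set t := rest.takeWhile (fun x => x == c) with ht
      set d := rest.dropWhile (fun x => x == c) with hd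
      have hrest : t ++ d = rest := List.takeWhile_append_dropWhile
      have htc : ∀ x ∈ t, x = c := by
        intro x hx
        rw [ht] at hx
        have hpx := List.mem_takeWhile_imp hx
        simp only [beq_iff_eq] at hpx
        exact hpx
      have hcd : ∀ x ∈ d, c < x := by
        intro x hx
        have hle : ∀ y ∈ rest, c ≤ y := by
          have := hs
          rw [List.pairwise_cons] at this
          exact this.1
        have hxrest : x ∈ rest := List.Sublist.mem hx (List.dropWhile_sublist _)
        have hlex : c ≤ x := hle x hxrest
        -- head of d fails the predicate; all of d ≥ head
        cases hdd : d with
        | nil => rw [hdd] at hx; simp at hx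
        | cons h tl =>
          have hhne' : h ≠ c := by
            have h0 := pv_dropWhile_head_ne (fun x => x == c) rest h tl (by rw [← hd, hdd])
            simpa using h0
          have hdsort : d.Pairwise (· ≤ ·) := by
            have hrp : rest.Pairwise (· ≤ ·) := (List.pairwise_cons.mp hs).2
            exact hrp.sublist (List.dropWhile_sublist _)
          have hch : c < h := by
            have : c ≤ h := by
              apply hle; exact List.Sublist.mem (by rw [← hd, hdd]; simp) (List.dropWhile_sublist _)
            exact lt_of_le_of_ne this (Ne.symm hhne')
          rw [hdd] at hx
          rcases List.mem_cons.mp hx with rfl | hxl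
          · exact hch
          · have : h ≤ x := by
              rw [hdd] at hdsort
              exact (List.pairwise_cons.mp hdsort).1 x hxl
            exact lt_of_lt_of_le hch this
      have hcnotd : c ∉ d := fun h => lt_irrefl c (hcd c h)
      have hcount_t : t.count c = t.length := by
        rw [List.count_eq_length]; intro x hx; exact ((htc x hx) ▸ rfl)
      have hcount_c : (c :: rest).count c = 1 + t.length := by
        rw [← hrest]
        simp [List.count_append, hcount_t, List.count_eq_zero.mpr hcnotd]
        omega
      have hcount_x : ∀ x ∈ d, (c :: rest).count x = d.count x := by
        intro x hx
        have hxc : x ≠ c := fun h => lt_irrefl c (h ▸ hcd x hx)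
        have hcount_xt : t.count x = 0 := by
          rw [List.count_eq_zero]
          intro hxt; exact hxc (htc x hxt)
        rw [← hrest]
        simp [List.count_append, hcount_xt, Ne.symm hxc]
      have hfin : (c :: rest).toFinset = insert c d.toFinset := by
        ext x
        simp only [List.mem_toFinset, Finset.mem_insert, List.mem_cons]
        constructor
        · rintro (rfl | hx)
          · left; rfl
          · rw [← hrest] at hx
            rcases List.mem_append.mp hx with hx | hx
            · left; exact htc x hx
            · right; simpa using hx
        · rintro (rfl | hx)
          · left; rfl
          · right; exact List.Sublist.mem hx (List.dropWhile_sublist _)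
      have hcnotfin : c ∉ d.toFinset := by simpa using hcnotd
      have hdsort : d.Pairwise (· ≤ ·) :=
        ((List.pairwise_cons.mp hs).2).sublist (List.dropWhile_sublist _)
      have hdlen : d.length < n := by
        have h1 := List.length_dropWhile_le (fun x => x == c) rest
        rw [← hd] at h1
        subst hn; simp only [List.length_cons]; omega
      -- unfold one step
      rw [pvScan]
      rw [ih d.length hdlen d hdsort _ _ rfl]
      have hrun : (1 + (t.length : Int)) = (((c :: rest).count c : Nat) : Int) := by
        rw [hcount_c]; push_cast; ring
      have hFc : (if PySem.Int.mod (1 + (t.length : Int)) 2 ≠ 0 then ((c.toNat : Int) - 96) * (1 + (t.length : Int)) else 0)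
          = pvF (c :: rest) c := by
        rw [pvF, hrun]
      have hsum : ∑ x ∈ (c :: rest).toFinset, pvF (c :: rest) x
          = pvF (c :: rest) c + ∑ x ∈ d.toFinset, pvF d x := by
        rw [hfin, Finset.sum_insert hcnotfin]
        congr 1
        apply Finset.sum_congr rfl
        intro x hx
        have := hcount_x x (List.mem_toFinset.mp hx)
        simp [pvF, this]
      have hcard : ((c :: rest).toFinset.card : Int) = 1 + (d.toFinset.card : Int) := by
        rw [hfin, Finset.card_insert_of_notMem hcnotfin]; push_cast; ring
      rw [hsum, hcard, hFc]
      simp only [Prod.mk.injEq]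
      exact ⟨by ring, by ring⟩

lemma filter_letters_spec' (message : String) (_ : Dom_filter_letters message)
    (hpre : Pre_filter_letters message) :
    filter_letters message = filter_letters_alt message := by
  simp only [filter_letters, filter_letters_alt]
  set m : List Char := (PySem.Str.lower message).toList with hm
  set s : List Char := PySem.List.sorted m (fun x => x) false with hsdef
  have hperm : s.Perm m := PySem.List.sorted_perm m (fun x => x) false
  have hsort : s.Pairwise (· ≤ ·) := by
    have := PySem.List.sorted_pairwise m (fun x => x)
    simpa using this
  have hcount : ∀ c, s.count c = m.count c := fun c => hperm.count_eq c
  have hfin : s.toFinset = m.toFinset := by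
    ext x; simp [List.mem_toFinset, hperm.mem_iff]
  set L : PySem.Set Char := PySem.Set.ofList m with hL
  have hLnodup : L.Nodup := PySem.Set.nodup_ofList m
  have hLfin : L.toFinset = m.toFinset := by
    ext x
    simp [hL, List.mem_toFinset, PySem.Set.mem_ofList]
  have hLlen : L.length = m.toFinset.card := by
    rw [← hLfin, List.toFinset_card_of_nodup hLnodup]
  rw [pvScan_spec s hsort 0 0]
  by_cases hle : L.length ≤ 1
  · have hcardn : ¬ 1 < s.toFinset.card := by rw [hfin]; omega
    simp [hle, hcardn]
  · have hcard : (0 : Int) + (s.toFinset.card : Int) > 1 := by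
      rw [hfin, ← hLlen]; omega
    simp only [hle, if_false, hcard, if_true]
    rw [PySem.List.foldl_add]
    have hnodd : ∀ c ∈ m, m.count c % 2 = 1 → c ∈ pvAsciiLowercase := by
      rcases hpre with h | h
      · exact absurd h hle
      · intro c hcm hcnt
        have hc := List.all_eq_true.mp h c hcm
        rcases (by simpa using hc :
            List.count c (PySem.Chars.lower message.toList) % 2 = 0 ∨ c ∈ pvAsciiLowercase) with
          h0 | hmem
        · exfalso
          have : m.count c = List.count c (PySem.Chars.lower message.toList) := by
            rw [hm]; simp [PySem.Str.toList_lower]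
          omega
        · exact hmem
    rw [← List.sum_toFinset _ hLnodup, hLfin, ← hfin]
    simp only [zero_add]
    apply Finset.sum_congr rfl
    intro c hc
    have hcm : c ∈ m := hperm.subset (List.mem_toFinset.mp hc)
    have hFc : pvF s c = pvF m c := by simp [pvF, hcount]
    rw [hFc]
    simp only [pvF]
    have hmod : PySem.Int.mod ((m.count c : Nat) : Int) 2 = ((m.count c % 2 : Nat) : Int) := by
      exact_mod_cast PySem.Int.mod_natCast (m.count c) 2
    by_cases hodd : m.count c % 2 = 1
    · have hne : PySem.Int.mod ((m.count c : Nat) : Int) 2 ≠ 0 := by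
        rw [hmod, hodd]; decide
      rw [if_pos hne, if_pos hne, pvValues_getD_eq c (hnodd c hcm hodd)]
    · have hne : ¬ PySem.Int.mod ((m.count c : Nat) : Int) 2 ≠ 0 := by
        have h0 : m.count c % 2 = 0 := by omega
        rw [hmod, h0]; decide
      rw [if_neg hne, if_neg hne]

-- ===== VERDICT (by name: the statement is the Claim_ definition above) =====
theorem filter_letters_spec : Claim_equal_filter_letters := by
  intro message hdom hpre
  unfold Spec_filter_letters
  exact filter_letters_spec' message hdom hpre
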